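-- pv_equiv track=rewrite | github.com/Dinesh94Singh/PythonArchivedSolutions | Companies/Microsoft/min_deletions_to_obtain_string_in_right_format.py | calculate
-- ===== SOURCE A (Python) =====
-- def calculate(s):
--     total_bs = 0
--     total_as = 0
--
--     for each in s:
--         if each == 'A':
--             total_as += 1
--
--     ans = total_as
--
--     for _, each in enumerate(s):
--         if each == 'A':
--             total_as -= 1
--         else:
--             total_bs += 1
--
--         ans = min(ans, total_as + total_bs)
--
--     return ans
-- ===== SOURCE B (Python) =====
-- def calculate(s):
--     b_count = 0
--     res = 0
--     for c in s:
--         if c == 'A':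
--             res = min(res + 1, b_count)
--         else:
--             b_count += 1
--     return res
-- ===== Notes on version B (the rewrite author's own statement) =====
-- stated objective: faster
-- what changed: Single-pass DP carrying (non-A count, min deletions) replaces A's counting pre-pass plus a second min-tracking pass.
import Mathlib
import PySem

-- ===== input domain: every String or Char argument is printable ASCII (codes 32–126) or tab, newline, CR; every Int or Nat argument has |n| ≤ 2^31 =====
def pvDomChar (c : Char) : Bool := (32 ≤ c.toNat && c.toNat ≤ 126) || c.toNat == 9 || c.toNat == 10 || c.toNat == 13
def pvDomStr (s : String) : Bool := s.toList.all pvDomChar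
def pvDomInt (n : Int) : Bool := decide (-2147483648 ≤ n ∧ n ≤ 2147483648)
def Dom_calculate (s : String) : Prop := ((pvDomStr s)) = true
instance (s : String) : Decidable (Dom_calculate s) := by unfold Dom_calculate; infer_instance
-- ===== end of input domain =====

-- B replaces A's two passes (count all 'A's, then scan tracking the running minimum)
-- by a single-pass DP carrying (count of non-'A' chars seen, min deletions so far).

-- ===== PORT A =====
-- step of A's second loop: state (total_bs, total_as, ans)
def calcStepA (st : Int × Int × Int) (each : Char) : Int × Int × Int :=
  let (total_bs, total_as, ans) := st
  let total_as := if each = 'A' then total_as - 1 else total_as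
  let total_bs := if each = 'A' then total_bs else total_bs + 1
  (total_bs, total_as, min ans (total_as + total_bs))

def calculate (s : String) : Int :=
  let total_as : Int :=
    s.toList.foldl (fun acc each => if each = 'A' then acc + 1 else acc) 0
  let ans := total_as
  ((s.toList.foldl calcStepA (0, total_as, ans)).2.2)

-- ===== PORT B =====
-- step of B's single loop: state (b_count, res)
def calcStepB (st : Int × Int) (c : Char) : Int × Int :=
  let (b_count, res) := st
  if c = 'A' then (b_count, min (res + 1) b_count) else (b_count + 1, res)

def calculate_alt (s : String) : Int :=
  ((s.toList.foldl calcStepB (0, 0)).2)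

-- ===== PRECONDITION & SPEC =====
def Spec_calculate (s : String) (out : Int) : Prop := out = calculate_alt s
instance (s : String) (out : Int) : Decidable (Spec_calculate s out) := by unfold Spec_calculate; infer_instance

-- ===== CLAIM (what is proved, stated in full; the proofs are below) =====
def Claim_equal_calculate : Prop := ∀ (s : String), Dom_calculate s → Spec_calculate s (calculate s)

-- ===== LEMMAS AND PROOFS =====

-- number of 'A's, as A's first loop computes it
def pvCntA (l : List Char) : Int :=
  l.foldl (fun acc each => if each = 'A' then acc + 1 else acc) 0

lemma pvCntA_foldl (l : List Char) : ∀ (a : Int),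
    l.foldl (fun acc each => if each = 'A' then acc + 1 else acc) a = a + pvCntA l := by
  induction l with
  | nil => intro a; simp [pvCntA]
  | cons c t ih =>
      intro a
      have h2 := ih (if c = 'A' then (0:Int) + 1 else 0)
      simp only [List.foldl_cons]
      rw [ih]
      conv_rhs => rw [pvCntA]
      simp only [List.foldl_cons]
      rw [h2]
      split <;> omega

lemma pvCntA_cons (c : Char) (t : List Char) :
    pvCntA (c :: t) = (if c = 'A' then (1:Int) else 0) + pvCntA t := by
  simp only [pvCntA, List.foldl_cons]
  rw [pvCntA_foldl]
  split <;> simp [pvCntA]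

-- loop invariant: A's state (bs, #A's left in t, res + #A's left in t) tracks B's (bs, res), given res ≤ bs
lemma pv_key : ∀ (t : List Char) (bs res : Int), res ≤ bs →
    (t.foldl calcStepA (bs, pvCntA t, res + pvCntA t)).2.2
      = (t.foldl calcStepB (bs, res)).2 := by
  intro t
  induction t with
  | nil => intro bs res _; simp [pvCntA]
  | cons c t ih =>
      intro bs res hle
      by_cases hc : c = 'A'
      · subst hc
        have hcnt : pvCntA ('A' :: t) = 1 + pvCntA t := by rw [pvCntA_cons]; simp
        have hA : calcStepA (bs, pvCntA ('A' :: t), res + pvCntA ('A' :: t)) 'A'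
            = (bs, pvCntA t, min (res + 1) bs + pvCntA t) := by
          simp only [calcStepA, hcnt, if_pos]
          refine Prod.ext rfl (Prod.ext ?_ ?_) <;> simp <;> omega
        have hB : calcStepB (bs, res) 'A' = (bs, min (res + 1) bs) := by
          simp [calcStepB]
        rw [List.foldl_cons, List.foldl_cons, hA, hB,
          ih bs (min (res + 1) bs) (min_le_right _ _)]
      · have hcnt : pvCntA (c :: t) = pvCntA t := by rw [pvCntA_cons]; simp [hc]
        have hA : calcStepA (bs, pvCntA (c :: t), res + pvCntA (c :: t)) c
            = (bs + 1, pvCntA t, res + pvCntA t) := by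
          simp only [calcStepA, hc, if_false, hcnt]
          refine Prod.ext rfl (Prod.ext ?_ ?_) <;> simp <;> omega
        have hB : calcStepB (bs, res) c = (bs + 1, res) := by
          simp [calcStepB, hc]
        rw [List.foldl_cons, List.foldl_cons, hA, hB, ih (bs + 1) res (by omega)]

-- ===== VERDICT (by name: the statement is the Claim_ definition above) =====
theorem calculate_spec : Claim_equal_calculate := by
  intro s _
  unfold Spec_calculate calculate calculate_alt
  simpa [pvCntA] using pv_key s.toList 0 0 le_rfl
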